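-- pv_equiv track=rewrite | github.com/shubham-debug/Python-Programs | WinningStrategy.py | solve
-- ===== SOURCE A (Python) =====
-- def solve(arr):
--     p1=0
--     p2=0
--     arr.sort(reverse=True)
--     p1=arr[0]
--     if(len(arr)>=3):
--         p2=arr[1]+arr[2]
--     elif(len(arr)==2):
--         p2=arr[1]
--     count=3
--     while(count<len(arr)):
--         p1+=arr[count]
--         count+=2
--     count=4
--     while(count<len(arr)):
--         p2+=arr[count]
--         count+=2
--     if(p1>p2):
--         return 'first'
--     elif(p2>p1):
--         return 'second'
--     return 'draw'
-- ===== SOURCE B (Python) =====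
-- def solve(arr):
--     arr.sort(reverse=True)
--     d = arr[0] - sum(arr[1:3])
--     it = iter(arr[3:])
--     for x in it:
--         d += x - next(it, 0)
--     if d > 0:
--         return 'first'
--     if d < 0:
--         return 'second'
--     return 'draw'
-- ===== Notes on version B (the rewrite author's own statement) =====
-- stated objective: alternative
-- what changed: Instead of accumulating the two players' sums p1 and p2 in separate striding loops and comparing them, B computes only the signed score difference: the top element minus the next two via a slice sum, then one pass consuming the remaining elements two at a time adding each pair's difference, and classifies the sign of that single accumulator.
import Mathlib
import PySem

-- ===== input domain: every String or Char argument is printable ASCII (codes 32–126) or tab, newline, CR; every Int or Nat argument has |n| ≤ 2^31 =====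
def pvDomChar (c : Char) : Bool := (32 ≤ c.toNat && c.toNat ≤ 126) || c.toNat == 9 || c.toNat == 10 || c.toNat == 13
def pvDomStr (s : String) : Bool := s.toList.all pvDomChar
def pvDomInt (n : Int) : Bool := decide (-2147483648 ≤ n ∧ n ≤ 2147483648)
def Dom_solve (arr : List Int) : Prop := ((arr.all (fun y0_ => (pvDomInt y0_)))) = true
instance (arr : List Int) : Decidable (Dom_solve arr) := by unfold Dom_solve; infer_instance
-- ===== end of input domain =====

-- B computes only the signed score difference (top element, minus a slice sum, plus one
-- pairwise pass) instead of A's two striding sum loops; return-value equivalence only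
-- (both Pythons sort arr in place, an observable mutation).

-- ===== PORT A =====
-- while(count<len(arr)): acc+=arr[count]; count+=2   (all reads are in range, so getD is exact)
def solveWhile (s : List Int) (count : Nat) (acc : Int) : Int :=
  if count < s.length then solveWhile s (count + 2) (acc + s.getD count 0) else acc
  termination_by s.length - count

def solve (arr : List Int) : String :=
  let s := PySem.List.sorted arr (fun x => x) (reverse := true)
  let p1 := s.getD 0 0          -- arr[0]; IndexError on [] is excluded by Pre_solve
  let p2 := if s.length ≥ 3 then s.getD 1 0 + s.getD 2 0
            else if s.length = 2 then s.getD 1 0 else 0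
  let p1 := solveWhile s 3 p1
  let p2 := solveWhile s 4 p2
  if p1 > p2 then "first" else if p2 > p1 then "second" else "draw"

-- ===== PORT B =====
-- the for-loop over iter(arr[3:]) consuming two elements per iteration: d += x - next(it, 0)
def pairDiff : List Int → Int
  | [] => 0
  | [x] => x
  | x :: y :: t => x - y + pairDiff t

def solve_alt (arr : List Int) : String :=
  let s := PySem.List.sorted arr (fun x => x) (reverse := true)
  let d := s.getD 0 0 - (PySem.List.slice s (some 1) (some 3)).sum
             + pairDiff (PySem.List.slice s (some 3) none)
  if d > 0 then "first" else if d < 0 then "second" else "draw"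

-- ===== PRECONDITION & SPEC =====
-- Pre_ excludes only the empty list, on which Python A raises IndexError reading the first element.
def Pre_solve (arr : List Int) : Prop := arr ≠ []
instance (arr : List Int) : Decidable (Pre_solve arr) := by unfold Pre_solve; infer_instance
def pvWitness_solve : List Int := [3, 1, 2]

def Spec_solve (arr : List Int) (out : String) : Prop := out = solve_alt arr
instance (arr : List Int) (out : String) : Decidable (Spec_solve arr out) := by unfold Spec_solve; infer_instance

-- ===== CLAIM (what is proved, stated in full; the proofs are below) =====
def Claim_equal_solve : Prop := ∀ (arr : List Int), Dom_solve arr → Pre_solve arr → Spec_solve arr (solve arr)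

-- ===== LEMMAS AND PROOFS =====

-- every-other-element sum of a list; solveWhile s k 0 = altSum (s.drop k)
def altSum : List Int → Int
  | [] => 0
  | [x] => x
  | x :: _ :: t => x + altSum t

lemma altSum_cons (x : Int) (t : List Int) : altSum (x :: t) = x + altSum t.tail := by
  cases t <;> simp [altSum]

lemma solveWhile_eq (s : List Int) (k : Nat) (acc : Int) :
    solveWhile s k acc = acc + altSum (s.drop k) := by
  by_cases h : k < s.length
  · rw [solveWhile]
    simp only [h, if_pos]
    rw [solveWhile_eq s (k + 2) (acc + s.getD k 0)]
    have hd : s.drop k = s[k] :: s.drop (k + 1) := List.drop_eq_getElem_cons h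
    rw [hd, altSum_cons, List.tail_drop, List.getD_eq_getElem s 0 h]
    ring_nf
  · rw [solveWhile]
    simp only [h]
    rw [List.drop_eq_nil_of_le (Nat.le_of_not_lt h)]
    simp [altSum]
  termination_by s.length - k

lemma pairDiff_eq (l : List Int) : pairDiff l = altSum l - altSum l.tail := by
  induction l using pairDiff.induct with
  | case1 => simp [pairDiff, altSum]
  | case2 x => simp [pairDiff, altSum]
  | case3 x y t ih =>
    rw [pairDiff, ih]
    have h1 : altSum (x :: y :: t) = x + altSum t := rfl
    rw [h1, List.tail_cons, altSum_cons y t]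
    ring

-- the difference of A's two accumulated sums equals B's single accumulator, on ANY list
lemma diff_eq (s : List Int) :
    solveWhile s 3 (s.getD 0 0) -
      solveWhile s 4 (if s.length ≥ 3 then s.getD 1 0 + s.getD 2 0
                      else if s.length = 2 then s.getD 1 0 else 0) =
    s.getD 0 0 - (PySem.List.slice s (some 1) (some 3)).sum
      + pairDiff (PySem.List.slice s (some 3) none) := by
  rw [solveWhile_eq, solveWhile_eq]
  rw [PySem.List.slice_toNat s (by norm_num) (by norm_num), PySem.List.slice_from s (by norm_num)]
  have h4 : s.drop 4 = (s.drop 3).tail := by rw [List.tail_drop]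
  rw [h4, pairDiff_eq]
  match s with
  | [] => simp [altSum]
  | [x] => simp [altSum]
  | [x, y] => simp [altSum]
  | x :: y :: z :: t =>
    have hl : (x :: y :: z :: t).length ≥ 3 := by simp
    rw [if_pos hl]
    simp
    ring

-- ===== VERDICT (by name: the statement is the Claim_ definition above) =====
theorem solve_spec : Claim_equal_solve := by
  intro arr _ _
  unfold Spec_solve solve solve_alt
  have h := diff_eq (PySem.List.sorted arr (fun x => x) (reverse := true))
  set s := PySem.List.sorted arr (fun x => x) (reverse := true)
  dsimp only
  set a := solveWhile s 3 (s.getD 0 0) with ha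
  set b := solveWhile s 4 (if s.length ≥ 3 then s.getD 1 0 + s.getD 2 0
                           else if s.length = 2 then s.getD 1 0 else 0) with hb
  set d := s.getD 0 0 - (PySem.List.slice s (some 1) (some 3)).sum
             + pairDiff (PySem.List.slice s (some 3) none) with hd
  split_ifs <;> first | rfl | omega
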